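-- pv_equiv track=rewrite | github.com/CorentinCLERO/concours_algo_grid | solvers/solver_dataset_6.py | select_grid_jokers_fixed10
-- ===== SOURCE A (Python) =====
-- from typing import List, Sequence, Tuple
--
-- Grid = List[List[int]]
--
-- JokerAction = Tuple[str, int, int, int, int, int]
--
-- def select_grid_jokers_fixed10(
--     target: Grid,
--     base_color: int,
--     already_corrected: List[List[bool]],
--     joker_limit: int,
--     max_joker_size: int,
-- ) -> List[JokerAction]:
--     if joker_limit <= 0:
--         return []
--
--     h = len(target)
--     w = len(target[0])
--     block = 10 if max_joker_size >= 100 else max(1, int(max_joker_size ** 0.5))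
--     candidates: List[Tuple[int, int, int, int, int]] = []
--
--     for y1 in range(0, h, block):
--         y2 = min(h - 1, y1 + block - 1)
--         for x1 in range(0, w, block):
--             x2 = min(w - 1, x1 + block - 1)
--             gain = 0
--             for y in range(y1, y2 + 1):
--                 row = target[y]
--                 corrected_row = already_corrected[y]
--                 for x in range(x1, x2 + 1):
--                     if not corrected_row[x] and row[x] != base_color:
--                         gain += 1
--             if gain > 0:
--                 candidates.append((gain, x1, y1, x2, y2))
--
--     candidates.sort(reverse=True)
--     selected = candidates[:joker_limit]
--     return [("JOKER", x1, y1, x2, y2, -1) for _gain, x1, y1, x2, y2 in selected]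
-- ===== SOURCE B (Python) =====
-- def select_grid_jokers_fixed10(
--     target,
--     base_color,
--     already_corrected,
--     joker_limit,
--     max_joker_size,
-- ):
--     if joker_limit <= 0:
--         return []
--
--     h = len(target)
--     w = len(target[0])
--     block = 10 if max_joker_size >= 100 else max(1, int(max_joker_size ** 0.5))
--
--     # One flat pass over all cells: count differing, uncorrected cells per block.
--     counts = {}
--     for y in range(h):
--         for x in range(w):
--             if not already_corrected[y][x] and target[y][x] != base_color:
--                 key = (y // block, x // block)
--                 counts[key] = counts.get(key, 0) + 1
--
--     candidates = []
--     for (by, bx), gain in counts.items():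
--         x1 = bx * block
--         y1 = by * block
--         candidates.append((gain, x1, y1, min(w - 1, x1 + block - 1), min(h - 1, y1 + block - 1)))
--
--     candidates.sort(reverse=True)
--     return [("JOKER", x1, y1, x2, y2, -1) for _gain, x1, y1, x2, y2 in candidates[:joker_limit]]
-- ===== Notes on version B (the rewrite author's own statement) =====
-- stated objective: alternative
-- what changed: A scans the grid block-by-block with four nested loops recomputing each block's gain in place; B makes one flat pass over all cells, tallying gains per block key (y//block, x//block) in a dictionary, then reconstructs the candidate tuples from the keys, sorts and slices.
import Mathlib
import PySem

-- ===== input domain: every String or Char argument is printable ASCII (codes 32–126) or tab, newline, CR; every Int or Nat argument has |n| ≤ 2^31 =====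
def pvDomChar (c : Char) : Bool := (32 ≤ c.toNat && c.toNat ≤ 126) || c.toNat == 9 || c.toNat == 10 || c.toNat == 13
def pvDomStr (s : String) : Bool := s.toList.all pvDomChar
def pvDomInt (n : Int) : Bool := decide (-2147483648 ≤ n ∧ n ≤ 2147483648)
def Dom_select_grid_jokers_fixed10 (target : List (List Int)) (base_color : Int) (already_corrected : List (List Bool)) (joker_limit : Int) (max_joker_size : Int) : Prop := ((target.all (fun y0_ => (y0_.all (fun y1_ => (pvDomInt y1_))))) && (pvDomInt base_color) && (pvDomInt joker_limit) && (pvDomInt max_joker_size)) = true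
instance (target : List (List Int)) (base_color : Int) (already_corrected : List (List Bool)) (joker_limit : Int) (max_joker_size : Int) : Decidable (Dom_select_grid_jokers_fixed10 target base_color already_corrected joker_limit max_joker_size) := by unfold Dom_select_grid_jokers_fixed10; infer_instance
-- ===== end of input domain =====

-- B replaces A's nested per-block scanning loops by ONE flat pass over all cells that counts
-- differing uncorrected cells per block in a dictionary (objective: simpler decomposition; not measured faster).

-- ===== PORT A =====
-- Python compares the candidate tuples (gain, x1, y1, x2, y2) lexicographically; Lean's Prod order
-- is not lexicographic, so the sort key is encoded via Lex products (exact for Python tuple comparison).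
def pvKey5 (c : Int × Int × Int × Int × Int) : Int ×ₗ (Int ×ₗ (Int ×ₗ (Int ×ₗ Int))) :=
  toLex (c.1, toLex (c.2.1, toLex (c.2.2.1, toLex (c.2.2.2.1, c.2.2.2.2))))

-- int(max_joker_size ** 0.5) is ported as Nat.sqrt: exact, since Pre_ gives 0 ≤ max_joker_size and
-- the branch limits it to < 100, where float sqrt + int() equals the integer square root.
def select_grid_jokers_fixed10 (target : List (List Int)) (base_color : Int) (already_corrected : List (List Bool)) (joker_limit : Int) (max_joker_size : Int) : List (String × Int × Int × Int × Int × Int) :=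
  if joker_limit ≤ 0 then []
  else
    let h : Int := PySem.List.len target
    let w : Int := PySem.List.len (PySem.List.pyGetD target 0 [])
    let block : Int := if 100 ≤ max_joker_size then 10 else max 1 ((Nat.sqrt max_joker_size.toNat : Int))
    let candidates : List (Int × Int × Int × Int × Int) :=
      (PySem.List.pyRange 0 h block).foldl (fun cands y1 =>
        let y2 := min (h - 1) (y1 + block - 1)
        (PySem.List.pyRange 0 w block).foldl (fun cands x1 =>
          let x2 := min (w - 1) (x1 + block - 1)
          let gain : Int :=
            (PySem.List.pyRange y1 (y2 + 1) 1).foldl (fun gain y =>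
              let row := PySem.List.pyGetD target y []
              let corrected_row := PySem.List.pyGetD already_corrected y []
              (PySem.List.pyRange x1 (x2 + 1) 1).foldl (fun gain x =>
                if ¬ (PySem.List.pyGetD corrected_row x false = true) ∧ PySem.List.pyGetD row x 0 ≠ base_color
                then gain + 1 else gain) gain) 0
          if 0 < gain then cands ++ [(gain, x1, y1, x2, y2)] else cands) cands) []
    let sortedc := PySem.List.sorted candidates pvKey5 true
    let selected := PySem.List.slice sortedc none (some joker_limit)
    selected.map (fun c => ("JOKER", c.2.1, c.2.2.1, c.2.2.2.1, c.2.2.2.2, (-1 : Int)))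

-- ===== PORT B =====
def select_grid_jokers_fixed10_alt (target : List (List Int)) (base_color : Int) (already_corrected : List (List Bool)) (joker_limit : Int) (max_joker_size : Int) : List (String × Int × Int × Int × Int × Int) :=
  if joker_limit ≤ 0 then []
  else
    let h : Int := PySem.List.len target
    let w : Int := PySem.List.len (PySem.List.pyGetD target 0 [])
    let block : Int := if 100 ≤ max_joker_size then 10 else max 1 ((Nat.sqrt max_joker_size.toNat : Int))
    let counts : PySem.Dict (Int × Int) Int :=
      (PySem.List.pyRange 0 h 1).foldl (fun counts y =>
        (PySem.List.pyRange 0 w 1).foldl (fun counts x =>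
          if ¬ (PySem.List.pyGetD (PySem.List.pyGetD already_corrected y []) x false = true) ∧
               PySem.List.pyGetD (PySem.List.pyGetD target y []) x 0 ≠ base_color then
            let key := (PySem.Int.floordiv y block, PySem.Int.floordiv x block)
            counts.insert key (counts.getD key 0 + 1)
          else counts) counts) PySem.Dict.empty
    let candidates : List (Int × Int × Int × Int × Int) :=
      counts.items.foldl (fun cands kv =>
        let x1 := kv.1.2 * block
        let y1 := kv.1.1 * block
        cands ++ [(kv.2, x1, y1, min (w - 1) (x1 + block - 1), min (h - 1) (y1 + block - 1))]) []
    let sortedc := PySem.List.sorted candidates pvKey5 true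
    (PySem.List.slice sortedc none (some joker_limit)).map (fun c => ("JOKER", c.2.1, c.2.2.1, c.2.2.2.1, c.2.2.2.2, (-1 : Int)))

-- ===== PRECONDITION & SPEC =====
-- Pre_ excludes inputs where A raises (empty target, negative max_joker_size with its float-power
-- TypeError, a mask or row too short for an indexed cell).  It requires a rectangular grid with a
-- full-size mask whenever the grid has columns; this slightly narrows A's domain: A can also return
-- on ragged inputs whose out-of-range cells are never read thanks to `and` short-circuiting.
def Pre_select_grid_jokers_fixed10 (target : List (List Int)) (base_color : Int) (already_corrected : List (List Bool)) (joker_limit : Int) (max_joker_size : Int) : Prop :=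
  0 < joker_limit →
    (target ≠ [] ∧ 0 ≤ max_joker_size ∧
      (0 < (target.headD []).length →
        target.length ≤ already_corrected.length ∧
        (∀ row ∈ target, (target.headD []).length ≤ row.length) ∧
        (∀ row ∈ already_corrected.take target.length, (target.headD []).length ≤ row.length)))
instance (target : List (List Int)) (base_color : Int) (already_corrected : List (List Bool)) (joker_limit : Int) (max_joker_size : Int) : Decidable (Pre_select_grid_jokers_fixed10 target base_color already_corrected joker_limit max_joker_size) := by unfold Pre_select_grid_jokers_fixed10; infer_instance

def pvWitness_select_grid_jokers_fixed10 : List (List Int) × Int × List (List Bool) × Int × Int :=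
  ([[1, 2], [3, 0]], 0, [[false, true], [false, false]], 2, 5)

def Spec_select_grid_jokers_fixed10 (target : List (List Int)) (base_color : Int) (already_corrected : List (List Bool)) (joker_limit : Int) (max_joker_size : Int) (out : List (String × Int × Int × Int × Int × Int)) : Prop := out = select_grid_jokers_fixed10_alt target base_color already_corrected joker_limit max_joker_size
instance (target : List (List Int)) (base_color : Int) (already_corrected : List (List Bool)) (joker_limit : Int) (max_joker_size : Int) (out : List (String × Int × Int × Int × Int × Int)) : Decidable (Spec_select_grid_jokers_fixed10 target base_color already_corrected joker_limit max_joker_size out) := by unfold Spec_select_grid_jokers_fixed10; infer_instance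

-- ===== CLAIM (what is proved, stated in full; the proofs are below) =====
def Claim_equal_select_grid_jokers_fixed10 : Prop := ∀ (target : List (List Int)) (base_color : Int) (already_corrected : List (List Bool)) (joker_limit : Int) (max_joker_size : Int), Dom_select_grid_jokers_fixed10 target base_color already_corrected joker_limit max_joker_size → Pre_select_grid_jokers_fixed10 target base_color already_corrected joker_limit max_joker_size → Spec_select_grid_jokers_fixed10 target base_color already_corrected joker_limit max_joker_size (select_grid_jokers_fixed10 target base_color already_corrected joker_limit max_joker_size)

-- ===== LEMMAS AND PROOFS =====

def pvGainA (h w block y1 x1 : Int) (Q : Int → Int → Prop) [∀ y x, Decidable (Q y x)] : Int :=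
  (PySem.List.pyRange y1 (min (h - 1) (y1 + block - 1) + 1) 1).foldl (fun gain y =>
    (PySem.List.pyRange x1 (min (w - 1) (x1 + block - 1) + 1) 1).foldl (fun gain x =>
      if Q y x then gain + 1 else gain) gain) 0

def pvGainN (h w block y1 x1 : Int) (Q : Int → Int → Prop) [∀ y x, Decidable (Q y x)] : Nat :=
  ((PySem.List.pyRange y1 (min (h - 1) (y1 + block - 1) + 1) 1).map (fun y =>
    (PySem.List.pyRange x1 (min (w - 1) (x1 + block - 1) + 1) 1).countP (fun x => decide (Q y x)))).sum

def pvCandA (h w block : Int) (Q : Int → Int → Prop) [∀ y x, Decidable (Q y x)] : List (Int × Int × Int × Int × Int) :=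
  (PySem.List.pyRange 0 h block).foldl (fun cands y1 =>
    (PySem.List.pyRange 0 w block).foldl (fun cands x1 =>
      if 0 < pvGainA h w block y1 x1 Q then
        cands ++ [(pvGainA h w block y1 x1 Q, x1, y1, min (w - 1) (x1 + block - 1), min (h - 1) (y1 + block - 1))]
      else cands) cands) []

def pvCounts (h w block : Int) (Q : Int → Int → Prop) [∀ y x, Decidable (Q y x)] : PySem.Dict (Int × Int) Int :=
  (PySem.List.pyRange 0 h 1).foldl (fun counts y =>
    (PySem.List.pyRange 0 w 1).foldl (fun counts x =>
      if Q y x then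
        counts.insert (PySem.Int.floordiv y block, PySem.Int.floordiv x block)
          (counts.getD (PySem.Int.floordiv y block, PySem.Int.floordiv x block) 0 + 1)
      else counts) counts) PySem.Dict.empty

def pvCandB (h w block : Int) (Q : Int → Int → Prop) [∀ y x, Decidable (Q y x)] : List (Int × Int × Int × Int × Int) :=
  (pvCounts h w block Q).items.foldl (fun cands kv =>
    cands ++ [(kv.2, kv.1.2 * block, kv.1.1 * block, min (w - 1) (kv.1.2 * block + block - 1), min (h - 1) (kv.1.1 * block + block - 1))]) []

def pvCells (h w block : Int) (Q : Int → Int → Prop) [∀ y x, Decidable (Q y x)] : List (Int × Int) :=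
  (PySem.List.pyRange 0 h 1).flatMap (fun y =>
    ((PySem.List.pyRange 0 w 1).filter (fun x => decide (Q y x))).map
      (fun x => (PySem.Int.floordiv y block, PySem.Int.floordiv x block)))

def pvTup (h w block : Int) (L : List (Int × Int)) (k : Int × Int) : Int × Int × Int × Int × Int :=
  ((L.count k : Int), k.2 * block, k.1 * block, min (w - 1) (k.2 * block + block - 1), min (h - 1) (k.1 * block + block - 1))

def pvKeysA (h w block : Int) (Q : Int → Int → Prop) [∀ y x, Decidable (Q y x)] : List (Int × Int) :=
  (PySem.List.pyRange 0 h block).flatMap (fun y1 =>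
    ((PySem.List.pyRange 0 w block).filter (fun x1 => decide (0 < pvGainA h w block y1 x1 Q))).map
      (fun x1 => (PySem.Int.floordiv y1 block, PySem.Int.floordiv x1 block)))

theorem pv_fdiv_bounds {b : Int} (hb : 0 < b) (y : Int) :
    PySem.Int.floordiv y b * b ≤ y ∧ y < PySem.Int.floordiv y b * b + b := by
  have h1 := PySem.Int.floordiv_mul_add_mod y b
  have h2 := PySem.Int.mod_nonneg y hb
  have h3 := PySem.Int.mod_lt y hb
  constructor <;> linarith

theorem pv_fdiv_mul {b : Int} (hb : 0 < b) (j : Int) : PySem.Int.floordiv (j * b) b = j := by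
  rw [PySem.Int.floordiv_eq_iff_of_pos hb]
  constructor
  · linarith
  · nlinarith

theorem pv_fdiv_eq {b : Int} (hb : 0 < b) {y j : Int} (h1 : j * b ≤ y) (h2 : y < j * b + b) :
    PySem.Int.floordiv y b = j := by
  rw [PySem.Int.floordiv_eq_iff_of_pos hb]
  constructor
  · linarith
  · nlinarith

theorem pv_fdiv_nonneg {b : Int} (hb : 0 < b) {y : Int} (hy : 0 ≤ y) : 0 ≤ PySem.Int.floordiv y b := by
  by_contra hneg
  push_neg at hneg
  have h := (pv_fdiv_bounds hb y).2
  nlinarith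

-- x ∈ [0, L) has floordiv x b = j  iff  x lies in the j-th block window

theorem pv_countP_div (L b j : Int) (hb : 0 < b) (h0 : 0 ≤ j) (hlt : j * b < L) (p : Int → Bool) :
    (PySem.List.pyRange 0 L 1).countP (fun x => (PySem.Int.floordiv x b == j) && p x)
    = (PySem.List.pyRange (j * b) (min (L - 1) (j * b + b - 1) + 1) 1).countP p := by
  obtain ⟨s, hs⟩ : ∃ s, s = j * b := ⟨_, rfl⟩
  have hsb : s + b = (j + 1) * b := by rw [hs]; ring
  have hs0 : 0 ≤ s := by rw [hs]; exact mul_nonneg h0 hb.le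
  rw [← hs] at hlt ⊢
  set e := min (L - 1) (s + b - 1) + 1 with he
  have hdiv : ∀ x : Int, PySem.Int.floordiv x b = j ↔ s ≤ x ∧ x < s + b := by
    intro x
    rw [PySem.Int.floordiv_eq_iff_of_pos hb, ← hs, ← hsb]
  rw [PySem.List.pyRange_one_append 0 s L hs0 hlt.le, List.countP_append,
      PySem.List.pyRange_one_append s e L (by omega) (by omega), List.countP_append]
  have c1 : (PySem.List.pyRange 0 s 1).countP (fun x => (PySem.Int.floordiv x b == j) && p x) = 0 := by
    rw [List.countP_eq_zero]
    intro x hx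
    rw [PySem.List.mem_pyRange_one] at hx
    simp only [Bool.and_eq_true, beq_iff_eq, not_and]
    intro hxj
    rw [hdiv] at hxj
    omega
  have c3 : (PySem.List.pyRange e L 1).countP (fun x => (PySem.Int.floordiv x b == j) && p x) = 0 := by
    rw [List.countP_eq_zero]
    intro x hx
    rw [PySem.List.mem_pyRange_one] at hx
    simp only [Bool.and_eq_true, beq_iff_eq, not_and]
    intro hxj
    rw [hdiv] at hxj
    omega
  have c2 : (PySem.List.pyRange s e 1).countP (fun x => (PySem.Int.floordiv x b == j) && p x)
      = (PySem.List.pyRange s e 1).countP p := by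
    apply List.countP_congr
    intro x hx
    rw [PySem.List.mem_pyRange_one] at hx
    simp only [Bool.and_eq_true, beq_iff_eq]
    have : PySem.Int.floordiv x b = j := by rw [hdiv]; omega
    simp [this]
  omega

theorem pv_sum_div (L b j : Int) (hb : 0 < b) (h0 : 0 ≤ j) (hlt : j * b < L) (f : Int → Nat)
    (hz : ∀ y, 0 ≤ y → y < L → PySem.Int.floordiv y b ≠ j → f y = 0) :
    ((PySem.List.pyRange 0 L 1).map f).sum
    = ((PySem.List.pyRange (j * b) (min (L - 1) (j * b + b - 1) + 1) 1).map f).sum := by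
  obtain ⟨s, hs⟩ : ∃ s, s = j * b := ⟨_, rfl⟩
  have hsb : s + b = (j + 1) * b := by rw [hs]; ring
  have hs0 : 0 ≤ s := by rw [hs]; exact mul_nonneg h0 hb.le
  rw [← hs] at hlt ⊢
  set e := min (L - 1) (s + b - 1) + 1 with he
  have hdiv : ∀ x : Int, PySem.Int.floordiv x b = j ↔ s ≤ x ∧ x < s + b := by
    intro x
    rw [PySem.Int.floordiv_eq_iff_of_pos hb, ← hs, ← hsb]
  rw [PySem.List.pyRange_one_append 0 s L hs0 hlt.le, List.map_append, List.sum_append,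
      PySem.List.pyRange_one_append s e L (by omega) (by omega), List.map_append, List.sum_append]
  have c1 : ((PySem.List.pyRange 0 s 1).map f).sum = 0 := by
    apply List.sum_eq_zero
    intro n hn
    obtain ⟨y, hy, rfl⟩ := List.mem_map.mp hn
    rw [PySem.List.mem_pyRange_one] at hy
    apply hz y (by omega) (by omega)
    rw [Ne, hdiv]
    omega
  have c3 : ((PySem.List.pyRange e L 1).map f).sum = 0 := by
    apply List.sum_eq_zero
    intro n hn
    obtain ⟨y, hy, rfl⟩ := List.mem_map.mp hn
    rw [PySem.List.mem_pyRange_one] at hy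
    apply hz y (by omega) (by omega)
    rw [Ne, hdiv]
    omega
  omega

theorem pvGainA_eq (h w block y1 x1 : Int) (Q : Int → Int → Prop) [∀ y x, Decidable (Q y x)] :
    pvGainA h w block y1 x1 Q = (pvGainN h w block y1 x1 Q : Int) := by
  unfold pvGainA pvGainN
  have step := PySem.List.foldl_congr_mem
    (l := PySem.List.pyRange y1 (min (h - 1) (y1 + block - 1) + 1) 1) (init := (0 : Int))
    (f := fun gain y => (PySem.List.pyRange x1 (min (w - 1) (x1 + block - 1) + 1) 1).foldl
      (fun gain x => if Q y x then gain + 1 else gain) gain)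
    (g := fun gain y => gain + ((PySem.List.pyRange x1 (min (w - 1) (x1 + block - 1) + 1) 1).countP (fun x => decide (Q y x)) : Int))
    (fun acc y _ => PySem.List.foldl_ite_add_one (fun x => Q y x) _ acc)
  rw [step, PySem.List.foldl_add, Nat.cast_list_sum, List.map_map]
  simp only [Function.comp_def]
  ring

theorem pvGainA_pos_iff (h w block y1 x1 : Int) (Q : Int → Int → Prop) [∀ y x, Decidable (Q y x)] :
    0 < pvGainA h w block y1 x1 Q ↔
      ∃ y, (y1 ≤ y ∧ y < min (h - 1) (y1 + block - 1) + 1) ∧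
        ∃ x, (x1 ≤ x ∧ x < min (w - 1) (x1 + block - 1) + 1) ∧ Q y x := by
  rw [pvGainA_eq]
  unfold pvGainN
  rw [Int.natCast_pos, Nat.pos_iff_ne_zero, Ne, List.sum_eq_zero_iff]
  simp only [List.mem_map, not_forall]
  constructor
  · rintro ⟨n, ⟨⟨y, hy, rfl⟩, hn⟩⟩
    rw [PySem.List.mem_pyRange_one] at hy
    have := List.countP_eq_zero.not.mp hn
    push_neg at this
    obtain ⟨x, hx, hqx⟩ := this
    rw [PySem.List.mem_pyRange_one] at hx
    exact ⟨y, hy, x, hx, of_decide_eq_true hqx⟩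
  · rintro ⟨y, hy, x, hx, hq⟩
    refine ⟨_, ⟨⟨y, PySem.List.mem_pyRange_one.mpr hy, rfl⟩, ?_⟩⟩
    intro hzero
    rw [List.countP_eq_zero] at hzero
    exact hzero x (PySem.List.mem_pyRange_one.mpr hx) (by simpa using hq)

theorem pv_count_cells (h w block : Int) (hb : 0 < block) (Q : Int → Int → Prop) [∀ y x, Decidable (Q y x)]
    (bi bj : Int) (h0i : 0 ≤ bi) (hih : bi * block < h) (h0j : 0 ≤ bj) (hjw : bj * block < w) :
    (pvCells h w block Q).count (bi, bj) = pvGainN h w block (bi * block) (bj * block) Q := by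
  unfold pvCells pvGainN
  rw [List.count_eq_countP, List.countP_flatMap]
  -- per-row inner count
  have hrow : ∀ y : Int,
      (List.countP (fun x => x == (bi, bj)) ∘ fun y =>
        ((PySem.List.pyRange 0 w 1).filter (fun x => decide (Q y x))).map
          (fun x => (PySem.Int.floordiv y block, PySem.Int.floordiv x block))) y
      = if PySem.Int.floordiv y block = bi then
          (PySem.List.pyRange (bj * block) (min (w - 1) (bj * block + block - 1) + 1) 1).countP (fun x => decide (Q y x))
        else 0 := by
    intro y
    simp only [Function.comp_apply, List.countP_map, List.countP_filter]
    by_cases hy : PySem.Int.floordiv y block = bi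
    · rw [if_pos hy, ← pv_countP_div w block bj hb h0j hjw (fun x => decide (Q y x))]
      apply List.countP_congr
      intro x _
      simp only [Function.comp_apply, Prod.mk.injEq, Bool.and_eq_true, beq_iff_eq, decide_eq_true_eq]
      constructor
      · rintro ⟨⟨h1, h2⟩, h3⟩; exact ⟨h2, h3⟩
      · rintro ⟨h2, h3⟩; exact ⟨⟨hy, h2⟩, h3⟩
    · rw [if_neg hy, List.countP_eq_zero]
      intro x _
      simp only [Function.comp_apply, Prod.mk.injEq, Bool.and_eq_true, beq_iff_eq, decide_eq_true_eq, not_and]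
      rintro ⟨h1, _⟩
      exact absurd h1 hy
  rw [List.map_congr_left (fun y _ => hrow y)]
  rw [pv_sum_div h block bi hb h0i hih _
    (fun y _ _ hne => by rw [if_neg hne])]
  apply congrArg
  apply List.map_congr_left
  intro y hy
  rw [PySem.List.mem_pyRange_one] at hy
  have : PySem.Int.floordiv y block = bi := by
    apply pv_fdiv_eq hb
    · omega
    · omega
  rw [if_pos this]

theorem pv_mem_block_range {b L y1 : Int} (hb : 0 < b) :
    y1 ∈ PySem.List.pyRange 0 L b ↔ ∃ j, 0 ≤ j ∧ y1 = j * b ∧ j * b < L := by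
  rw [PySem.List.mem_pyRange_iff_of_pos hb]
  constructor
  · rintro ⟨h1, h2, c, hc⟩
    have hcb : y1 = c * b := by rw [mul_comm]; omega
    exact ⟨c, by nlinarith, hcb, by omega⟩
  · rintro ⟨j, hj0, rfl, hjL⟩
    exact ⟨mul_nonneg hj0 hb.le, hjL, j, by ring⟩

theorem pv_candA_eq (h w block : Int) (hb : 0 < block) (Q : Int → Int → Prop) [∀ y x, Decidable (Q y x)] :
    pvCandA h w block Q = (pvKeysA h w block Q).map (pvTup h w block (pvCells h w block Q)) := by
  unfold pvCandA pvKeysA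
  have step := PySem.List.foldl_congr_mem
    (l := PySem.List.pyRange 0 h block) (init := ([] : List (Int × Int × Int × Int × Int)))
    (f := fun cands y1 => (PySem.List.pyRange 0 w block).foldl (fun cands x1 =>
      if 0 < pvGainA h w block y1 x1 Q then
        cands ++ [(pvGainA h w block y1 x1 Q, x1, y1, min (w - 1) (x1 + block - 1), min (h - 1) (y1 + block - 1))]
      else cands) cands)
    (g := fun cands y1 => cands ++
      ((PySem.List.pyRange 0 w block).filter (fun x1 => decide (0 < pvGainA h w block y1 x1 Q))).map
        (fun x1 => (pvGainA h w block y1 x1 Q, x1, y1, min (w - 1) (x1 + block - 1), min (h - 1) (y1 + block - 1))))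
    (fun acc y1 _ => PySem.List.foldl_append_ite (fun x1 => 0 < pvGainA h w block y1 x1 Q) _ _ acc)
  rw [step, PySem.List.foldl_append_eq_flatMap, List.nil_append, List.map_flatMap]
  apply List.flatMap_congr
  intro y1 hy1
  rw [List.map_map]
  apply List.map_congr_left
  intro x1 hx1
  rw [List.mem_filter, decide_eq_true_eq] at hx1
  obtain ⟨hx1r, _⟩ := hx1
  obtain ⟨bi, hbi0, rfl, hbih⟩ := (pv_mem_block_range hb).mp hy1
  obtain ⟨bj, hbj0, rfl, hbjw⟩ := (pv_mem_block_range hb).mp hx1r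
  simp only [Function.comp_apply, pvTup, pv_fdiv_mul hb]
  rw [pv_count_cells h w block hb Q bi bj hbi0 hbih hbj0 hbjw, ← pvGainA_eq]

theorem pv_block_range_pairwise_ne {b : Int} (a L : Int) (hb : 0 < b) :
    (PySem.List.pyRange a L b).Pairwise (· ≠ ·) := by
  rw [PySem.List.pyRange_of_pos a L hb, List.pairwise_map]
  apply List.pairwise_lt_range.imp
  intro k k' hlt heq
  have h2 : b * (k : Int) = b * (k' : Int) := by omega
  have h3 : (k : Int) = (k' : Int) := mul_left_cancel₀ (by omega) h2
  omega

theorem pv_keys_nodup (h w block : Int) (hb : 0 < block) (Q : Int → Int → Prop) [∀ y x, Decidable (Q y x)] :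
    (pvKeysA h w block Q).Nodup := by
  unfold pvKeysA
  rw [List.nodup_flatMap]
  constructor
  · intro y1 _
    apply List.Nodup.map_on
    · intro x hx x' hx' heq
      rw [List.mem_filter] at hx hx'
      obtain ⟨bj, h0j, rfl, _⟩ := (pv_mem_block_range hb).mp hx.1
      obtain ⟨bj', h0j', rfl, _⟩ := (pv_mem_block_range hb).mp hx'.1
      simp only [Prod.mk.injEq, pv_fdiv_mul hb] at heq
      rw [heq.2]
    · exact List.Nodup.filter _ (pv_block_range_pairwise_ne 0 w hb)
  · apply List.Pairwise.imp_of_mem (l := PySem.List.pyRange 0 h block)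
      (R := (· ≠ ·)) ?_ (pv_block_range_pairwise_ne 0 h hb)
    intro y1 y1' hy1 hy1' hne
    obtain ⟨bi, h0i, rfl, _⟩ := (pv_mem_block_range hb).mp hy1
    obtain ⟨bi', h0i', rfl, _⟩ := (pv_mem_block_range hb).mp hy1'
    rw [Function.onFun, List.disjoint_left]
    rintro k hk hk'
    obtain ⟨x, _, rfl⟩ := List.mem_map.mp hk
    obtain ⟨x', _, heq⟩ := List.mem_map.mp hk'
    simp only [Prod.mk.injEq, pv_fdiv_mul hb] at heq
    exact hne (by rw [heq.1])

theorem pv_mem_keysA_iff (h w block : Int) (hb : 0 < block) (Q : Int → Int → Prop) [∀ y x, Decidable (Q y x)]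
    (k : Int × Int) : k ∈ pvKeysA h w block Q ↔ k ∈ pvCells h w block Q := by
  unfold pvKeysA pvCells
  simp only [List.mem_flatMap, List.mem_map, List.mem_filter, decide_eq_true_eq,
    PySem.List.mem_pyRange_one]
  constructor
  · rintro ⟨y1, hy1, x1, ⟨⟨hx1r, hgain⟩, rfl⟩⟩
    obtain ⟨bi, h0i, rfl, hih⟩ := (pv_mem_block_range hb).mp hy1
    obtain ⟨bj, h0j, rfl, hjw⟩ := (pv_mem_block_range hb).mp hx1r
    rw [pvGainA_pos_iff] at hgain
    obtain ⟨y, hyb, x, hxb, hq⟩ := hgain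
    have hbi0 : 0 ≤ bi * block := mul_nonneg h0i hb.le
    have hbj0 : 0 ≤ bj * block := mul_nonneg h0j hb.le
    refine ⟨y, ⟨by omega, by omega⟩, x, ⟨⟨⟨by omega, by omega⟩, hq⟩, ?_⟩⟩
    have hy' : PySem.Int.floordiv y block = bi := pv_fdiv_eq hb (by omega) (by omega)
    have hx' : PySem.Int.floordiv x block = bj := pv_fdiv_eq hb (by omega) (by omega)
    rw [hy', hx', pv_fdiv_mul hb, pv_fdiv_mul hb]
  · rintro ⟨y, hy, x, ⟨⟨hx, hq⟩, rfl⟩⟩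
    obtain ⟨s, hs⟩ : ∃ s, s = PySem.Int.floordiv y block * block := ⟨_, rfl⟩
    obtain ⟨t, ht⟩ : ∃ t, t = PySem.Int.floordiv x block * block := ⟨_, rfl⟩
    have hsy := pv_fdiv_bounds hb y
    have htx := pv_fdiv_bounds hb x
    rw [← hs] at hsy
    rw [← ht] at htx
    refine ⟨s, ?_, t, ⟨⟨?_, ?_⟩, ?_⟩⟩
    · rw [hs]
      exact (pv_mem_block_range hb).mpr ⟨_, pv_fdiv_nonneg hb (by omega), rfl, by omega⟩
    · rw [ht]
      exact (pv_mem_block_range hb).mpr ⟨_, pv_fdiv_nonneg hb (by omega), rfl, by omega⟩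
    · rw [pvGainA_pos_iff]
      exact ⟨y, ⟨by omega, by omega⟩, x, ⟨by omega, by omega⟩, hq⟩
    · rw [hs, ht, pv_fdiv_mul hb, pv_fdiv_mul hb]

theorem pv_counts_eq_counter (h w block : Int) (Q : Int → Int → Prop) [∀ y x, Decidable (Q y x)] :
    pvCounts h w block Q = PySem.Dict.counter (pvCells h w block Q) := by
  rw [← PySem.Dict.foldl_insert_getD_add_one_eq_counter]
  unfold pvCounts pvCells
  rw [List.foldl_flatMap]
  apply PySem.List.foldl_congr_mem
  intro acc y _
  rw [List.foldl_map, PySem.List.foldl_ite_eq_foldl_filter (p := fun x => Q y x)]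

theorem pv_candB_eq (h w block : Int) (Q : Int → Int → Prop) [∀ y x, Decidable (Q y x)] :
    pvCandB h w block Q = (PySem.Set.ofList (pvCells h w block Q)).map (pvTup h w block (pvCells h w block Q)) := by
  unfold pvCandB
  rw [PySem.List.foldl_append_singleton_eq_map
    (f := fun kv : (Int × Int) × Int => (kv.2, kv.1.2 * block, kv.1.1 * block, min (w - 1) (kv.1.2 * block + block - 1), min (h - 1) (kv.1.1 * block + block - 1)))]
  rw [pv_counts_eq_counter, PySem.Dict.items_counter, List.map_map]
  simp [pvTup, Function.comp]

theorem pvKey5_inj : Function.Injective pvKey5 := by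
  intro a b hab
  simp only [pvKey5, toLex_inj, Prod.mk.injEq] at hab
  obtain ⟨h1, h2, h3, h4, h5⟩ := hab
  exact Prod.ext h1 (Prod.ext h2 (Prod.ext h3 (Prod.ext h4 h5)))

theorem pv_sorted_congr (l₁ l₂ : List (Int × Int × Int × Int × Int)) (hp : l₁.Perm l₂) :
    PySem.List.sorted l₁ pvKey5 true = PySem.List.sorted l₂ pvKey5 true := by
  apply PySem.List.eq_of_perm_of_pairwise_le_of_injective (key := fun c => OrderDual.toDual (pvKey5 c))
  · exact fun a b hab => pvKey5_inj (OrderDual.toDual.injective hab)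
  · exact ((PySem.List.sorted_perm l₁ pvKey5 true).trans hp).trans (PySem.List.sorted_perm l₂ pvKey5 true).symm
  · exact (PySem.List.sorted_pairwise_rev l₁ pvKey5).imp (fun h => h)
  · exact (PySem.List.sorted_pairwise_rev l₂ pvKey5).imp (fun h => h)

theorem pv_keys_perm (h w block : Int) (hb : 0 < block) (Q : Int → Int → Prop) [∀ y x, Decidable (Q y x)] :
    (pvKeysA h w block Q).Perm (PySem.Set.ofList (pvCells h w block Q)) := by
  rw [List.perm_ext_iff_of_nodup (pv_keys_nodup h w block hb Q) (PySem.Set.nodup_ofList _)]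
  intro k
  rw [PySem.Set.mem_ofList, pv_mem_keysA_iff h w block hb Q]

theorem pv_bridge (h w block jl : Int) (hb : 0 < block) (Q : Int → Int → Prop) [∀ y x, Decidable (Q y x)] :
    (PySem.List.slice (PySem.List.sorted (pvCandA h w block Q) pvKey5 true) none (some jl)).map
      (fun c => (("JOKER" : String), c.2.1, c.2.2.1, c.2.2.2.1, c.2.2.2.2, (-1 : Int)))
    = (PySem.List.slice (PySem.List.sorted (pvCandB h w block Q) pvKey5 true) none (some jl)).map
      (fun c => (("JOKER" : String), c.2.1, c.2.2.1, c.2.2.2.1, c.2.2.2.2, (-1 : Int))) := by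
  have hperm : (pvCandA h w block Q).Perm (pvCandB h w block Q) := by
    rw [pv_candA_eq h w block hb Q, pv_candB_eq]
    exact (pv_keys_perm h w block hb Q).map _
  rw [pv_sorted_congr _ _ hperm]

theorem pv_main (target : List (List Int)) (base_color : Int) (already_corrected : List (List Bool)) (joker_limit : Int) (max_joker_size : Int) :
    select_grid_jokers_fixed10 target base_color already_corrected joker_limit max_joker_size
    = select_grid_jokers_fixed10_alt target base_color already_corrected joker_limit max_joker_size := by
  unfold select_grid_jokers_fixed10 select_grid_jokers_fixed10_alt
  by_cases hj : joker_limit ≤ 0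
  · simp [hj]
  · simp only [if_neg hj]
    have hb : (0:Int) < (if 100 ≤ max_joker_size then 10 else max 1 ((Nat.sqrt max_joker_size.toNat : Int))) := by
      split <;> omega
    exact pv_bridge (PySem.List.len target) (PySem.List.len (PySem.List.pyGetD target 0 []))
      (if 100 ≤ max_joker_size then 10 else max 1 ((Nat.sqrt max_joker_size.toNat : Int))) joker_limit hb
      (fun y x => ¬ (PySem.List.pyGetD (PySem.List.pyGetD already_corrected y []) x false = true) ∧
        PySem.List.pyGetD (PySem.List.pyGetD target y []) x 0 ≠ base_color)

-- ===== VERDICT (by name: the statement is the Claim_ definition above) =====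

-- ===== VERDICT (by name: the statement is the Claim_ definition above) =====
theorem select_grid_jokers_fixed10_spec : Claim_equal_select_grid_jokers_fixed10 := by
  intro target base_color already_corrected joker_limit max_joker_size _ _
  unfold Spec_select_grid_jokers_fixed10
  exact pv_main target base_color already_corrected joker_limit max_joker_size
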